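-- pv_equiv track=rewrite | github.com/Christian-bustelo/Nist800_90B_impl | testPermutacion.py | calculate_number_of_runs_median
-- ===== SOURCE A (Python) =====
-- def calculate_number_of_runs_median(data):
--     median = sorted(data)[len(data) // 2]
--     S_prime = [1 if value >= median else -1 for value in data]
--     T = 1
--
--     for i in range(1, len(S_prime)):
--         if S_prime[i] != S_prime[i - 1]:
--             T += 1
--
--     return T
-- ===== SOURCE B (Python) =====
-- def calculate_number_of_runs_median(data):
--     def select(xs, k):
--         # k-th smallest of xs (0-based) by three-way quickselect, middle pivot
--         p = xs[len(xs) // 2]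
--         lt = [x for x in xs if x < p]
--         if k < len(lt):
--             return select(lt, k)
--         eq = len([x for x in xs if x == p])
--         if k < len(lt) + eq:
--             return p
--         return select([x for x in xs if x > p], k - len(lt) - eq)
--
--     median = select(data, len(data) // 2)
--     runs = 1
--     prev = data[0] >= median
--     for x in data[1:]:
--         cur = x >= median
--         if cur != prev:
--             runs += 1
--         prev = cur
--     return runs
-- ===== Notes on version B (the rewrite author's own statement) =====
-- stated objective: alternative
-- what changed: replaces the full sort with a three-way quickselect for the n//2-th order statistic and counts run boundaries in one pass over the data without materializing the +1/-1 sign list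
import Mathlib
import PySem

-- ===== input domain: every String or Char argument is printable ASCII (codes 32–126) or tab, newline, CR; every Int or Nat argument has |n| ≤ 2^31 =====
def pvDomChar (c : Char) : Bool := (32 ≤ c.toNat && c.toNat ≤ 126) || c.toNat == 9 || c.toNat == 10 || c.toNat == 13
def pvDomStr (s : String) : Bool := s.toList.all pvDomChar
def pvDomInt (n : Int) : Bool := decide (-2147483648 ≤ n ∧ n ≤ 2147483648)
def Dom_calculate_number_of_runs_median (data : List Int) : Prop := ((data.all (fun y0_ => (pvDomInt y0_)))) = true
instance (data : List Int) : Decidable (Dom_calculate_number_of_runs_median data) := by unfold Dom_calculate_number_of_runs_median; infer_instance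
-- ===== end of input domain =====

-- B replaces the full sort by a three-way quickselect for the n//2-th order statistic and counts
-- run boundaries in a single pass without materializing the +1/-1 sign list (objective: alternative).

-- ===== PORT A =====
def calculate_number_of_runs_median (data : List Int) : Int :=
  let median := PySem.List.pyGetD (PySem.List.sorted data (fun v => v) false)
      (PySem.Int.floordiv ((data.length : Int)) 2) 0
  let S' := data.map (fun value => if median ≤ value then (1 : Int) else -1)
  (PySem.List.pyRange 1 ((S'.length : Int)) 1).foldl
    (fun T i =>
      if PySem.List.pyGetD S' i 0 ≠ PySem.List.pyGetD S' (i - 1) 0 then T + 1 else T) 1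

-- ===== PORT B =====
-- termination helper for pvSelect: a filter missing some element of the list is strictly shorter
theorem pv_filter_lt_length {l : List Int} {p : Int → Bool} {x : Int}
    (hx : x ∈ l) (hpx : p x = false) : (l.filter p).length < l.length := by
  have h1 : (l.filter p).length ≤ l.length := List.length_filter_le ..
  rcases Nat.lt_or_ge (l.filter p).length l.length with h | h
  · exact h
  · exfalso
    have h2 : l.countP p = l.length := by
      rw [List.countP_eq_length_filter]; omega
    have := List.countP_eq_length.mp h2 x hx
    simp [hpx] at this

theorem pv_mid_mem (x : Int) (t : List Int) :
    (x :: t).getD ((x :: t).length / 2) 0 ∈ (x :: t) := by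
  have hlt : (x :: t).length / 2 < (x :: t).length := by
    simp only [List.length_cons]; omega
  rw [List.getD_eq_getElem _ _ hlt]
  exact List.getElem_mem hlt

-- select(xs, k): k-th smallest by three-way quickselect, middle pivot (port of B's helper)
def pvSelect (xs : List Int) (k : Nat) : Int :=
  match xs with
  | [] => 0
  | x :: t =>
    let p := (x :: t).getD ((x :: t).length / 2) 0
    let lt := (x :: t).filter (fun y => decide (y < p))
    if k < lt.length then pvSelect lt k
    else
      let eqc := ((x :: t).filter (fun y => decide (y = p))).length
      if k < lt.length + eqc then p
      else pvSelect ((x :: t).filter (fun y => decide (p < y))) (k - lt.length - eqc)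
termination_by xs.length
decreasing_by
  · exact pv_filter_lt_length (pv_mid_mem x t) (by simp)
  · exact pv_filter_lt_length (pv_mid_mem x t) (by simp)

def calculate_number_of_runs_median_alt (data : List Int) : Int :=
  match data with
  | [] => 0
  | x :: rest =>
    let median := pvSelect (x :: rest) ((x :: rest).length / 2)
    (rest.foldl
      (fun (s : Bool × Int) y =>
        let cur := decide (median ≤ y)
        (cur, if cur ≠ s.1 then s.2 + 1 else s.2))
      (decide (median ≤ x), 1)).2

-- ===== PRECONDITION & SPEC =====
-- Pre_ excludes only the empty list, on which A raises IndexError when indexing the sorted list (B raises there too).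
def Pre_calculate_number_of_runs_median (data : List Int) : Prop := data ≠ []
instance (data : List Int) : Decidable (Pre_calculate_number_of_runs_median data) := by
  unfold Pre_calculate_number_of_runs_median; infer_instance
def pvWitness_calculate_number_of_runs_median : List Int := [3, 1, 2, 2]

def Spec_calculate_number_of_runs_median (data : List Int) (out : Int) : Prop := out = calculate_number_of_runs_median_alt data
instance (data : List Int) (out : Int) : Decidable (Spec_calculate_number_of_runs_median data out) := by unfold Spec_calculate_number_of_runs_median; infer_instance

-- ===== CLAIM (what is proved, stated in full; the proofs are below) =====
def Claim_equal_calculate_number_of_runs_median : Prop := ∀ (data : List Int), Dom_calculate_number_of_runs_median data → Pre_calculate_number_of_runs_median data → Spec_calculate_number_of_runs_median data (calculate_number_of_runs_median data)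

-- ===== LEMMAS AND PROOFS =====

-- number of sign changes (w.r.t. threshold m) along prev :: l
def pvChg (m prev : Int) (l : List Int) : Int :=
  match l with
  | [] => 0
  | y :: t => (if decide (m ≤ y) ≠ decide (m ≤ prev) then (1 : Int) else 0) + pvChg m y t

-- B's run-counting fold computes 1 + pvChg
theorem pvB_fold (m : Int) (rest : List Int) : ∀ (x : Int) (c : Int),
    (rest.foldl
      (fun (s : Bool × Int) y =>
        let cur := decide (m ≤ y)
        (cur, if cur ≠ s.1 then s.2 + 1 else s.2))
      (decide (m ≤ x), c)).2 = c + pvChg m x rest := by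
  induction rest with
  | nil => intro x c; simp [pvChg]
  | cons y t ih =>
    intro x c
    simp only [List.foldl_cons, pvChg]
    rw [ih y]
    by_cases h : decide (m ≤ y) = decide (m ≤ x)
    · simp [h]
    · simp [h]
      ring

theorem pvChg_append (m : Int) (t : List Int) : ∀ (x z : Int),
    pvChg m x (t ++ [z]) =
      pvChg m x t +
        (if decide (m ≤ z) ≠ decide (m ≤ (x :: t).getLast (by simp)) then (1 : Int) else 0) := by
  induction t with
  | nil => intro x z; simp [pvChg]
  | cons y t' ih =>
    intro x z
    simp only [List.cons_append, pvChg, ih y z]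
    rw [List.getLast_cons (by simp : (y :: t') ≠ [])]
    ring

theorem pv_count_filter_pos {l : List Int} {q : Int → Bool} {a : Int} (h : q a = false) :
    (l.filter q).count a = 0 := by
  rw [List.count_eq_zero]
  intro hmem
  have := List.of_mem_filter hmem
  simp [h] at this

theorem pv_perm (l : List Int) (p : Int) :
    (l.filter (fun y => decide (y < p)) ++
      (List.replicate (l.count p) p ++ l.filter (fun y => decide (p < y)))).Perm l := by
  rw [List.perm_iff_count]
  intro a
  rw [List.count_append, List.count_append, List.count_replicate]
  rcases lt_trichotomy a p with h | h | h
  · rw [List.count_filter (by simp [h]), pv_count_filter_pos (by simp; omega), if_neg (by simp; omega)]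
    omega
  · subst h
    rw [pv_count_filter_pos (by simp), pv_count_filter_pos (by simp), if_pos (by simp)]
    omega
  · rw [pv_count_filter_pos (by simp; omega), List.count_filter (by simp [h]), if_neg (by simp; omega)]
    omega

theorem pv_sorted_decomp (l : List Int) (p : Int) :
    PySem.List.sorted l (fun v => v) false =
      PySem.List.sorted (l.filter (fun y => decide (y < p))) (fun v => v) false
      ++ (List.replicate (l.count p) p
      ++ PySem.List.sorted (l.filter (fun y => decide (p < y))) (fun v => v) false) := by
  apply PySem.List.sorted_id_eq_of_perm_of_pairwise
  · refine List.Perm.trans ?_ (pv_perm l p)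
    exact (PySem.List.sorted_perm _ _ _).append
      ((List.Perm.refl _).append (PySem.List.sorted_perm _ _ _))
  · rw [List.pairwise_append]
    refine ⟨PySem.List.sorted_pairwise _ _, ?_, ?_⟩
    · rw [List.pairwise_append]
      refine ⟨List.pairwise_replicate.mpr (Or.inr le_rfl), PySem.List.sorted_pairwise _ _, ?_⟩
      intro a ha b hb
      have hb' := List.of_mem_filter ((PySem.List.mem_sorted _ _ _ _).mp hb)
      have ha' := List.eq_of_mem_replicate ha
      simp at hb'; omega
    · intro a ha b hb
      have ha' := List.of_mem_filter ((PySem.List.mem_sorted _ _ _ _).mp ha)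
      simp at ha'
      rcases List.mem_append.mp hb with hb | hb
      · have hb' := List.eq_of_mem_replicate hb; omega
      · have hb' := List.of_mem_filter ((PySem.List.mem_sorted _ _ _ _).mp hb)
        simp at hb'; omega

theorem pv_eqc_count (l : List Int) (p : Int) :
    (l.filter (fun y => decide (y = p))).length = l.count p := by
  have : (fun y : Int => decide (y = p)) = (fun y : Int => y == p) := by
    funext y; by_cases h : y = p <;> simp [h]
  rw [this, ← List.count_eq_length_filter]

theorem pvSelect_correct : ∀ (xs : List Int) (k : Nat), k < xs.length →
    pvSelect xs k = (PySem.List.sorted xs (fun v => v) false).getD k 0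
  | [], k, hk => by simp at hk
  | x :: t, k, hk => by
    rw [pvSelect]
    have hdec := pv_sorted_decomp (x :: t) ((x :: t).getD ((x :: t).length / 2) 0)
    set p := (x :: t).getD ((x :: t).length / 2) 0 with hp
    set f1 := (x :: t).filter (fun y => decide (y < p)) with hf1
    set f2 := (x :: t).filter (fun y => decide (p < y)) with hf2
    have heqc : ((x :: t).filter (fun y => decide (y = p))).length = (x :: t).count p :=
      pv_eqc_count _ _
    have hlens : (x :: t).length = f1.length + (x :: t).count p + f2.length := by
      have hc := congrArg List.length hdec
      simp only [List.length_append, PySem.List.length_sorted, List.length_replicate] at hc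
      omega
    simp only [heqc]
    split_ifs with h1 h2
    · rw [pvSelect_correct f1 k h1, hdec,
        List.getD_append _ _ _ _ (by rw [PySem.List.length_sorted]; exact h1)]
    · rw [hdec, List.getD_append_right _ _ _ _ (by rw [PySem.List.length_sorted]; omega)]
      rw [PySem.List.length_sorted]
      rw [List.getD_append _ _ _ _ (by rw [List.length_replicate]; omega)]
      exact (List.getD_replicate _ (by omega : k - f1.length < List.count p (x :: t))).symm
    · rw [pvSelect_correct f2 (k - f1.length - (x :: t).count p) (by omega), hdec]
      rw [List.getD_append_right _ _ _ _ (by rw [PySem.List.length_sorted]; omega)]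
      rw [PySem.List.length_sorted]
      rw [List.getD_append_right _ _ _ _ (by rw [List.length_replicate]; omega)]
      rw [List.length_replicate]
termination_by xs _ => xs.length
decreasing_by
  all_goals exact pv_filter_lt_length (pv_mid_mem x t) (by simp)

theorem pv_pyGetD_append {a : List Int} (b : List Int) {i : Int} (h0 : 0 ≤ i) (h1 : i < (a.length : Int)) :
    PySem.List.pyGetD (a ++ b) i 0 = PySem.List.pyGetD a i 0 := by
  rw [PySem.List.pyGetD_eq_getElem (a ++ b) 0 h0 (by simp; omega),
    PySem.List.pyGetD_eq_getElem a 0 h0 h1]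
  exact List.getElem_append_left (by omega)

-- A's fold over indices computes 1 + pvChg
theorem pvA_fold (m x : Int) (rest : List Int) :
    (PySem.List.pyRange 1 (((x :: rest).length : Int)) 1).foldl
      (fun T i =>
        if PySem.List.pyGetD ((x :: rest).map (fun v => if m ≤ v then (1 : Int) else -1)) i 0 ≠
            PySem.List.pyGetD ((x :: rest).map (fun v => if m ≤ v then (1 : Int) else -1)) (i - 1) 0
          then T + 1 else T) 1
    = 1 + pvChg m x rest := by
  induction rest using List.reverseRecOn with
  | nil =>
    rw [PySem.List.pyRange_one_eq_nil (by simp)]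
    simp [pvChg]
  | append_singleton t z ih =>
    have hmap : (x :: (t ++ [z])).map (fun v => if m ≤ v then (1 : Int) else -1)
        = ((x :: t).map (fun v => if m ≤ v then (1 : Int) else -1)) ++ [if m ≤ z then (1 : Int) else -1] := by
      simp
    have hlen : ((x :: (t ++ [z])).length : Int) = ((x :: t).length : Int) + 1 := by
      simp
    have hone : (1 : Int) ≤ ((x :: t).length : Int) := by simp
    rw [hlen, PySem.List.pyRange_one_succ_right hone, List.foldl_append, List.foldl_cons,
      List.foldl_nil, hmap]
    set S := (x :: t).map (fun v => if m ≤ v then (1 : Int) else -1) with hS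
    have hSl : S.length = (x :: t).length := by simp [hS]
    have hpre : (PySem.List.pyRange 1 (((x :: t).length : Int)) 1).foldl
        (fun T i =>
          if PySem.List.pyGetD (S ++ [if m ≤ z then (1 : Int) else -1]) i 0 ≠
              PySem.List.pyGetD (S ++ [if m ≤ z then (1 : Int) else -1]) (i - 1) 0
            then T + 1 else T) 1
        = 1 + pvChg m x t := by
      have hcongr := PySem.List.foldl_congr_mem (PySem.List.pyRange 1 (((x :: t).length : Int)) 1)
        (fun (T : Int) i =>
          if PySem.List.pyGetD (S ++ [if m ≤ z then (1 : Int) else -1]) i 0 ≠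
              PySem.List.pyGetD (S ++ [if m ≤ z then (1 : Int) else -1]) (i - 1) 0
            then T + 1 else T)
        (fun (T : Int) i =>
          if PySem.List.pyGetD S i 0 ≠ PySem.List.pyGetD S (i - 1) 0 then T + 1 else T)
        (1 : Int) (by
          intro acc i hi
          rw [PySem.List.mem_pyRange_one] at hi
          simp only
          rw [pv_pyGetD_append _ (by omega) (by omega), pv_pyGetD_append _ (by omega) (by omega)])
      exact hcongr.trans ih
    rw [hpre]
    have h1 : PySem.List.pyGetD (S ++ [if m ≤ z then (1 : Int) else -1]) (((x :: t).length : Int)) 0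
        = (if m ≤ z then (1 : Int) else -1) := by
      have hlt : (((x :: t).length : Int)) < (((S ++ [if m ≤ z then (1 : Int) else -1]).length : Int)) := by
        simp [hSl]
      rw [PySem.List.pyGetD_eq_getElem _ 0 (by omega) hlt]
      exact List.getElem_concat_length (by simp [hSl]) _
    have hlast : (x :: t).getLast (by simp) = (x :: t)[(x :: t).length - 1] :=
      List.getLast_eq_getElem _
    have h2 : PySem.List.pyGetD (S ++ [if m ≤ z then (1 : Int) else -1]) ((((x :: t).length : Int)) - 1) 0
        = (if m ≤ (x :: t).getLast (by simp) then (1 : Int) else -1) := by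
      rw [pv_pyGetD_append _ (by omega) (by omega)]
      rw [PySem.List.pyGetD_eq_getElem _ 0 (by omega) (by omega)]
      have hidx : ((((x :: t).length : Int)) - 1).toNat = (x :: t).length - 1 := by
        simp only [List.length_cons]; omega
      simp only [hidx, hS, List.getElem_map]
      rw [hlast]
    rw [h1, h2, pvChg_append]
    by_cases hz : m ≤ z <;> by_cases hl : m ≤ (x :: t).getLast (by simp) <;>
      simp [hz, hl] <;> ring

-- ===== VERDICT (by name: the statement is the Claim_ definition above) =====
theorem calculate_number_of_runs_median_spec : Claim_equal_calculate_number_of_runs_median := by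
  intro data _ hP
  unfold Spec_calculate_number_of_runs_median
  match data with
  | [] => exact absurd rfl hP
  | x :: rest =>
    have hlen : ((x :: rest).length) / 2 < (x :: rest).length := by
      simp only [List.length_cons]; omega
    have hmed : PySem.List.pyGetD (PySem.List.sorted (x :: rest) (fun v => v) false)
        (PySem.Int.floordiv (((x :: rest).length : Int)) 2) 0
        = pvSelect (x :: rest) ((x :: rest).length / 2) := by
      have h2 : PySem.Int.floordiv (((x :: rest).length : Int)) 2
          = (((x :: rest).length / 2 : Nat) : Int) := by
        exact_mod_cast PySem.Int.floordiv_natCast (x :: rest).length 2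
      rw [h2, PySem.List.pyGetD_natCast, pvSelect_correct (x :: rest) _ hlen]
    unfold calculate_number_of_runs_median calculate_number_of_runs_median_alt
    simp only [List.length_map, hmed]
    rw [pvA_fold, pvB_fold]
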